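-- pv_equiv track=rewrite | github.com/longlive-pandas/FDS_Kaggle_Competition | Other_attempts/stacking_final.py | get_power_set_non_empty_as_list
-- ===== SOURCE A (Python) =====
-- import itertools
--
-- def get_power_set_non_empty_as_list(array):
--   n = len(array)
--   combinations_iterators = (
--       itertools.combinations(array, k) for k in range(1, n + 1)
--   )
--   non_empty_subsets_tuples = itertools.chain.from_iterable(combinations_iterators)
--   non_empty_subsets_lists = [
--       list(subset_tuple) for subset_tuple in non_empty_subsets_tuples
--   ]
--   return non_empty_subsets_lists
-- ===== SOURCE B (Python) =====
-- def get_power_set_non_empty_as_list(array):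
--     n = len(array)
--     result = []
--     chosen = []
--
--     def backtrack(start, k):
--         if len(chosen) == k:
--             result.append(list(chosen))
--             return
--         for i in range(start, n):
--             chosen.append(array[i])
--             backtrack(i + 1, k)
--             chosen.pop()
--
--     for k in range(1, n + 1):
--         backtrack(0, k)
--     return result
-- ===== Notes on version B (the rewrite author's own statement) =====
-- stated objective: alternative
-- what changed: Replaces itertools.combinations/chain with a hand-written recursive backtracking enumerator that builds each size-k combination explicitly and accumulates results in the same size-then-lexicographic order.
import Mathlib
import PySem

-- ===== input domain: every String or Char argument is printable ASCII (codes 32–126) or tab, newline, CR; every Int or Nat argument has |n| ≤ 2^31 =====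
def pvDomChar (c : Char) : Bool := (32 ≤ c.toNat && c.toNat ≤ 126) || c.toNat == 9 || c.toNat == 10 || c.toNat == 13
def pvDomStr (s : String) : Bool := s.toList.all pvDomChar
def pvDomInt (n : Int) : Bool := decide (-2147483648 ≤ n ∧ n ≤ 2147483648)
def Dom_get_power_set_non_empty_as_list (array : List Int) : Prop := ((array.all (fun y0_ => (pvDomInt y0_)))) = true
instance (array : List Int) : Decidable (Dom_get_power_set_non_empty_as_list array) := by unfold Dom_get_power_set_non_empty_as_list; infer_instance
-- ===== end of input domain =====

-- B replaces A's itertools.combinations/chain pipeline with a hand-written recursive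
-- backtracking enumerator producing the same subsets in the same order (alternative, not faster).

-- ===== PORT A =====
-- itertools.combinations(xs, k) in index-lexicographic order (the library call A makes).
def pyCombinations (xs : List Int) (k : Nat) : List (List Int) :=
  match k, xs with
  | 0, _ => [[]]
  | _ + 1, [] => []
  | k + 1, x :: xs =>
      (pyCombinations xs k).map (fun c => x :: c) ++ pyCombinations xs (k + 1)

-- A: chain of combinations(array, k) for k in range(1, n+1), each tuple turned into a list.
def get_power_set_non_empty_as_list (array : List Int) : List (List Int) :=
  ((List.range array.length).map (fun k => pyCombinations array (k + 1))).flatten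

-- ===== PORT B =====
-- backtrack over the suffix of the array: `need` elements still to pick, `chosen` the
-- current partial combination (in pick order), `acc` the shared result list.
def btB : List Int → Nat → List Int → List (List Int) → List (List Int)
  | _, 0, chosen, acc => acc ++ [chosen]
  | [], _ + 1, _, acc => acc
  | x :: xs, need + 1, chosen, acc =>
      btB xs (need + 1) chosen (btB xs need (chosen ++ [x]) acc)

def get_power_set_non_empty_as_list_alt (array : List Int) : List (List Int) :=
  (List.range array.length).foldl (fun acc k => btB array (k + 1) [] acc) []

-- ===== PRECONDITION & SPEC =====
def Spec_get_power_set_non_empty_as_list (array : List Int) (out : List (List Int)) : Prop := out = get_power_set_non_empty_as_list_alt array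
instance (array : List Int) (out : List (List Int)) : Decidable (Spec_get_power_set_non_empty_as_list array out) := by unfold Spec_get_power_set_non_empty_as_list; infer_instance

-- ===== CLAIM (what is proved, stated in full; the proofs are below) =====
def Claim_equal_get_power_set_non_empty_as_list : Prop := ∀ (array : List Int), Dom_get_power_set_non_empty_as_list array → Spec_get_power_set_non_empty_as_list array (get_power_set_non_empty_as_list array)

-- ===== LEMMAS AND PROOFS =====

theorem btB_eq (xs : List Int) (need : Nat) (chosen : List Int) (acc : List (List Int)) :
    btB xs need chosen acc = acc ++ (pyCombinations xs need).map (fun c => chosen ++ c) := by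
  induction xs generalizing need chosen acc with
  | nil =>
    cases need with
    | zero => simp [btB, pyCombinations]
    | succ n => simp [btB, pyCombinations]
  | cons x xs ih =>
    cases need with
    | zero => simp [btB, pyCombinations]
    | succ n =>
      simp [btB, pyCombinations, ih, List.map_map, Function.comp, List.append_assoc]

theorem fold_eq (array : List Int) (m : Nat) (acc : List (List Int)) :
    (List.range m).foldl (fun acc k => btB array (k + 1) [] acc) acc
      = acc ++ ((List.range m).map (fun k => pyCombinations array (k + 1))).flatten := by
  induction m generalizing acc with
  | zero => simp
  | succ m ih =>
    simp [List.range_succ, btB_eq, List.append_assoc]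

-- ===== VERDICT (by name: the statement is the Claim_ definition above) =====
theorem get_power_set_non_empty_as_list_spec : Claim_equal_get_power_set_non_empty_as_list := by
  intro array _
  unfold Spec_get_power_set_non_empty_as_list get_power_set_non_empty_as_list
    get_power_set_non_empty_as_list_alt
  rw [fold_eq]
  simp
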